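-- pv_equiv track=rewrite | github.com/Ipshita29/100DaysOfCode | Day23/ques1.py | magicalArrays
-- ===== SOURCE A (Python) =====
-- def magicalArrays(arr):
--     n = len(arr)
--     count = 0
--     lo = 0
--     while lo < n:
--         hi = lo
--         while hi < n and arr[lo] == arr[hi]:
--             hi += 1
--         length = hi - lo
--         count += (length * (length + 1)) // 2
--         lo = hi
--     return count
-- ===== SOURCE B (Python) =====
-- def magicalArrays(arr):
--     count = 0
--     run = 0
--     prev = None
--     for x in arr:
--         if prev is not None and x == prev:
--             run += 1
--         else:
--             run = 1
--         count += run
--         prev = x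
--     return count
-- ===== Notes on version B (the rewrite author's own statement) =====
-- stated objective: simpler
-- what changed: Replaces A's nested while loops (inner run-boundary scan plus L*(L+1)//2 closed form per run) by a single flat for-loop keeping an incremental run counter added to the total each step.
import Mathlib
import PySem

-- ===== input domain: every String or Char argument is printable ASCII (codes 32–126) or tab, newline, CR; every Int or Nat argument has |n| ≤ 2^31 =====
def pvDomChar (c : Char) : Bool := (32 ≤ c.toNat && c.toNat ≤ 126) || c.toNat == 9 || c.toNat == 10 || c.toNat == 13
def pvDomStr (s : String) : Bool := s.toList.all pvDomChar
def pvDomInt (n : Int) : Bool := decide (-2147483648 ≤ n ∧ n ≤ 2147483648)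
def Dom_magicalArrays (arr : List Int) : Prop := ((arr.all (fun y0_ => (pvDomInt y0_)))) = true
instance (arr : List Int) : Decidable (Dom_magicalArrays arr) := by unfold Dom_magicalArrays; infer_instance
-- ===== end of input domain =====

-- B replaces A's nested run-boundary scan with closed-form L*(L+1)//2 per run by one
-- flat loop keeping an incremental run counter; objective: simpler.

-- ===== PORT A =====
-- inner while loop: 'while hi < n and arr[lo] == arr[hi]: hi += 1'
def pvInner (arr : List Int) (n lo hi : Int) : Int :=
  if h : hi < n ∧ PySem.List.pyGet? arr lo = PySem.List.pyGet? arr hi then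
    pvInner arr n lo (hi + 1)
  else hi
termination_by (n - hi).toNat
decreasing_by omega

theorem pvInner_ge (arr : List Int) (n lo : Int) : ∀ hi : Int, hi ≤ pvInner arr n lo hi := by
  intro hi
  induction hi using pvInner.induct arr n lo with
  | case1 hi h ih => rw [pvInner, dif_pos h]; omega
  | case2 hi _h => rw [pvInner, dif_neg _h]

theorem pvInner_gt (arr : List Int) (n lo : Int) (h : lo < n) : lo < pvInner arr n lo lo := by
  rw [pvInner, dif_pos ⟨h, rfl⟩]
  have := pvInner_ge arr n lo (lo + 1)
  omega

-- outer while loop: 'while lo < n: …'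
def pvOuter (arr : List Int) (n count lo : Int) : Int :=
  if h : lo < n then 
    let hi := pvInner arr n lo lo
    let length := hi - lo
    pvOuter arr n (count + PySem.Int.floordiv (length * (length + 1)) 2) hi
  else count
termination_by (n - lo).toNat
decreasing_by
  have := pvInner_gt arr n lo h
  omega

def magicalArrays (arr : List Int) : Int :=
  pvOuter arr arr.length 0 0

-- ===== PORT B =====
-- loop body of B's single for-loop; state = (count, run, prev)
def pvStep (st : Int × Int × Option Int) (x : Int) : Int × Int × Option Int :=
  let run := if st.2.2 = some x then st.2.1 + 1 else 1
  (st.1 + run, run, some x)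

def magicalArrays_alt (arr : List Int) : Int :=
  (arr.foldl pvStep (0, 0, none)).1

-- ===== PRECONDITION & SPEC =====
def Spec_magicalArrays (arr : List Int) (out : Int) : Prop := out = magicalArrays_alt arr
instance (arr : List Int) (out : Int) : Decidable (Spec_magicalArrays arr out) := by unfold Spec_magicalArrays; infer_instance

-- ===== CLAIM (what is proved, stated in full; the proofs are below) =====
def Claim_equal_magicalArrays : Prop := ∀ (arr : List Int), Dom_magicalArrays arr → Spec_magicalArrays arr (magicalArrays arr)

-- ===== LEMMAS AND PROOFS =====

-- length of the maximal prefix of xs all equal to v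
def pvCW (v : Int) : List Int → Nat
  | [] => 0
  | x :: xs => if x = v then pvCW v xs + 1 else 0

theorem pvCW_le (v : Int) : ∀ xs : List Int, pvCW v xs ≤ xs.length
  | [] => Nat.le_refl _
  | x :: xs => by
      simp only [pvCW, List.length_cons]
      split
      · exact Nat.succ_le_succ (pvCW_le v xs)
      · exact Nat.zero_le _

-- triangular numbers
def pvT : Nat → Int
  | 0 => 0
  | k + 1 => pvT k + (k + 1)

theorem pvT_mul : ∀ k : Nat, (2 : Int) * pvT k = (k : Int) * ((k : Int) + 1)
  | 0 => by simp [pvT]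
  | k + 1 => by
      have h := pvT_mul k
      simp only [pvT]
      push_cast
      linear_combination h

theorem pvT_floordiv (k : Nat) :
    PySem.Int.floordiv ((k : Int) * ((k : Int) + 1)) 2 = pvT k := by
  rw [PySem.Int.floordiv_eq_ediv_of_pos (by norm_num), ← pvT_mul k,
    Int.mul_ediv_cancel_left _ (by norm_num)]

-- reference value: sum over maximal runs of the triangular number of the run length
def pvF : List Int → Int
  | [] => 0
  | x :: xs => pvT (pvCW x xs + 1) + pvF (xs.drop (pvCW x xs))
termination_by xs => xs.length
decreasing_by
  simp only [List.length_drop, List.length_cons]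
  omega

theorem inner_spec (arr : List Int) (lo v : Int)
    (hv : PySem.List.pyGet? arr lo = some v) :
    ∀ (d m : Nat), arr.length = m + d →
      pvInner arr (arr.length : Int) lo (m : Int) = (m : Int) + (pvCW v (arr.drop m) : Int) := by
  intro d
  induction d with
  | zero =>
      intro m h
      have hm : m = arr.length := by omega
      rw [pvInner, dif_neg (by omega)]
      simp [hm, pvCW]
  | succ d ih =>
      intro m h
      have hm : m < arr.length := by omega
      have hget : PySem.List.pyGet? arr (m : Int) = some arr[m] := by
        simp [PySem.List.pyGet?_natCast, List.getElem?_eq_getElem hm]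
      have hdrop : arr.drop m = arr[m] :: arr.drop (m + 1) := List.drop_eq_getElem_cons hm
      by_cases he : arr[m] = v
      · rw [pvInner, dif_pos ⟨by exact_mod_cast hm, by rw [hv, hget, he]⟩]
        have : ((m : Int) + 1) = ((m + 1 : Nat) : Int) := by push_cast; ring
        rw [this, ih (m + 1) (by omega)]
        rw [hdrop]
        simp [pvCW, he]
        ring
      · rw [pvInner, dif_neg]
        · rw [hdrop]; simp [pvCW, he]
        · intro hc
          rw [hv, hget] at hc
          exact he (Option.some.inj hc.2).symm

theorem outer_spec (arr : List Int) :
    ∀ (d m : Nat) (c : Int), arr.length ≤ m + d → m ≤ arr.length →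
      pvOuter arr (arr.length : Int) c (m : Int) = c + pvF (arr.drop m) := by
  intro d
  induction d using Nat.strong_induction_on with
  | _ d ih =>
    intro m c hd hm
    rw [pvOuter]
    split
    · rename_i h
      have hmlt : m < arr.length := by exact_mod_cast h
      have hget : PySem.List.pyGet? arr (m : Int) = some arr[m] := by
        simp [PySem.List.pyGet?_natCast, List.getElem?_eq_getElem hmlt]
      have hdrop : arr.drop m = arr[m] :: arr.drop (m + 1) := List.drop_eq_getElem_cons hmlt
      set k := pvCW arr[m] (arr.drop (m + 1)) with hk
      have hcw : pvCW arr[m] (arr.drop m) = k + 1 := by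
        rw [hdrop, hk]; simp [pvCW]
      have hkle : k ≤ arr.length - (m + 1) := by
        have := pvCW_le arr[m] (arr.drop (m + 1))
        simpa [List.length_drop] using this
      have hinner' : pvInner arr (arr.length : Int) (m : Int) (m : Int)
          = (m : Int) + ((k + 1 : Nat) : Int) := by
        rw [inner_spec arr (m : Int) arr[m] hget (arr.length - m) m (by omega), hcw]
      rw [hinner']
      show pvOuter arr (arr.length : Int)
          (c + PySem.Int.floordiv (((m : Int) + ((k + 1 : Nat) : Int) - (m : Int)) *
            (((m : Int) + ((k + 1 : Nat) : Int) - (m : Int)) + 1)) 2)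
          ((m : Int) + ((k + 1 : Nat) : Int)) = c + pvF (List.drop m arr)
      have hlen : (m : Int) + ((k + 1 : Nat) : Int) - (m : Int) = ((k + 1 : Nat) : Int) := by ring
      rw [hlen, pvT_floordiv (k + 1)]
      have hcast : (m : Int) + ((k + 1 : Nat) : Int) = ((m + k + 1 : Nat) : Int) := by push_cast; ring
      rw [hcast, ih (d - (k + 1)) (by omega) (m + k + 1) _ (by omega) (by omega)]
      have hdrop2 : (arr.drop (m + 1)).drop k = arr.drop (m + k + 1) := by
        rw [List.drop_drop]
        congr 1
        omega
      rw [hdrop]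
      simp only [pvF]
      rw [← hk, hdrop2]
      ring
    · rename_i h
      have : m = arr.length := by omega
      simp [this, pvF]

theorem fold_spec : ∀ (ys : List Int) (c r v : Int),
    (ys.foldl pvStep (c, r, some v)).1
      = c + (pvCW v ys : Int) * r + pvT (pvCW v ys) + pvF (ys.drop (pvCW v ys)) := by
  intro ys
  induction ys with
  | nil => intro c r v; simp [pvCW, pvF, pvT]
  | cons x xs ih =>
      intro c r v
      by_cases he : x = v
      · simp only [List.foldl_cons, pvStep, he]
        rw [ih]
        simp [pvCW, pvT]
        ring
      · have hne : ¬ (some v = some x) := by simp [Ne.symm he]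
        simp only [List.foldl_cons, pvStep, if_neg hne]
        rw [ih]
        simp only [pvCW, if_neg he, List.drop_zero]
        simp only [pvF]
        simp [pvT]
        ring

theorem main_eq (arr : List Int) : magicalArrays arr = magicalArrays_alt arr := by
  unfold magicalArrays magicalArrays_alt
  have hA : pvOuter arr (arr.length : Int) 0 0 = pvF arr := by
    have := outer_spec arr arr.length 0 0 (by omega) (by omega)
    simpa using this
  rw [hA]
  cases arr with
  | nil => simp [pvF]
  | cons x xs =>
      simp only [List.foldl_cons, pvStep]
      rw [if_neg (by simp)]
      rw [fold_spec]
      simp only [pvF]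
      simp [pvT]
      ring

-- ===== VERDICT (by name: the statement is the Claim_ definition above) =====
theorem magicalArrays_spec : Claim_equal_magicalArrays := by
  intro arr _
  unfold Spec_magicalArrays
  exact main_eq arr
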